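-- pv_equiv track=rewrite | github.com/encryptionspidy/LogVision | app/processing/signal_extractor.py | extract_key_log_snippets
-- ===== SOURCE A (Python) =====
-- from typing import List, Dict, Any, Tuple
--
-- def extract_key_log_snippets(log_lines: List[str], count: int = 10) -> List[str]:
--     """
--     Extract key log snippets for evidence.
--
--     Prioritizes:
--     - Error lines
--     - Lines with priority keywords
--     - Lines from high-error components
--
--     Args:
--         log_lines: List of log lines
--         count: Number of snippets to extract
--
--     Returns:
--         List of log snippets
--     """
--     scored_lines = []
--
--     for i, line in enumerate(log_lines):
--         score = 0
--         line_upper = line.upper()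
--
--         # Score based on severity
--         if 'CRITICAL' in line_upper or 'FATAL' in line_upper:
--             score += 10
--         elif 'ERROR' in line_upper:
--             score += 7
--         elif 'WARN' in line_upper or 'WARNING' in line_upper:
--             score += 5
--
--         # Score based on priority keywords
--         for keyword in ['exception', 'timeout', 'failed', 'denied', 'refused']:
--             if keyword in line_upper:
--                 score += 3
--
--         # Score based on length (prefer meaningful logs)
--         if len(line) > 50 and len(line) < 500:
--             score += 1
--
--         scored_lines.append((score, i, line))
--
--     # Sort by score and return top snippets
--     scored_lines.sort(key=lambda x: x[0], reverse=True)
--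
--     snippets = []
--     for score, idx, line in scored_lines[:count]:
--         snippets.append(line.strip())
--
--     return snippets
-- ===== SOURCE B (Python) =====
-- # Bucket-sort re-implementation: group lines by score in a dict, then emit buckets
-- # in descending score order (ties keep enumeration order), slice, strip.
-- def _score(line):
--     u = line.upper()
--     if 'CRITICAL' in u or 'FATAL' in u:
--         sev = 10
--     elif 'ERROR' in u:
--         sev = 7
--     elif 'WARN' in u or 'WARNING' in u:
--         sev = 5
--     else:
--         sev = 0
--     kw = 3 * sum(1 for k in ('exception', 'timeout', 'failed', 'denied', 'refused') if k in u)
--     return sev + kw + (1 if 50 < len(line) < 500 else 0)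
--
-- def extract_key_log_snippets(log_lines, count=10):
--     keyed = [(_score(line), (i, line)) for i, line in enumerate(log_lines)]
--     buckets = {}
--     for s, item in keyed:
--         buckets.setdefault(s, []).append(item)
--     ordered = []
--     for s in sorted(buckets, reverse=True):
--         ordered.extend(buckets[s])
--     return [line.strip() for _, line in ordered[:count]]
-- ===== Notes on version B (the rewrite author's own statement) =====
-- stated objective: alternative
-- what changed: Replaces the global stable sort of (score,index,line) triples with a single-pass bucket dict keyed by score (ties keep enumeration order) concatenated in descending score order; scoring is recomposed as severity + 3*keyword-count + length-bonus instead of sequential +=.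
import Mathlib
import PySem

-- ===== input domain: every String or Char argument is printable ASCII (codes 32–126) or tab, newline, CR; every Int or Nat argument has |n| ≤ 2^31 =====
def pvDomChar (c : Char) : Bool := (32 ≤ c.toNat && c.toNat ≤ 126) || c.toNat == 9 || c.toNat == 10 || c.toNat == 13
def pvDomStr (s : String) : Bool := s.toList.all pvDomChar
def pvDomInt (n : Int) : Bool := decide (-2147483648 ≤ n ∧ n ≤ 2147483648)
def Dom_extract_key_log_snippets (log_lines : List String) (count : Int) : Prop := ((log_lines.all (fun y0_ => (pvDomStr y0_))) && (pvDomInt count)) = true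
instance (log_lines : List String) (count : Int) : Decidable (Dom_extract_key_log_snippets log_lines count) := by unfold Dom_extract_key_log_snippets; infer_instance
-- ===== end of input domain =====

-- B replaces A's global stable sort of (score, index, line) triples by a one-pass score-keyed
-- bucket dict emitted in descending score order (objective: alternative algorithm, same exact output).

-- ===== PORT A =====
-- the score A's loop body computes for one line (score = 0; += in A's order)
def pvScoreA (line : String) : Int :=
  let line_upper := PySem.Str.upper line
  let score : Int := 0
  let score :=
    if PySem.Str.isIn "CRITICAL" line_upper || PySem.Str.isIn "FATAL" line_upper then score + 10
    else if PySem.Str.isIn "ERROR" line_upper then score + 7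
    else if PySem.Str.isIn "WARN" line_upper || PySem.Str.isIn "WARNING" line_upper then score + 5
    else score
  let score := ["exception", "timeout", "failed", "denied", "refused"].foldl
    (fun sc kw => if PySem.Str.isIn kw line_upper then sc + 3 else sc) score
  if 50 < PySem.Str.len line ∧ PySem.Str.len line < 500 then score + 1 else score

def extract_key_log_snippets (log_lines : List String) (count : Int) : List String :=
  let scored_lines := (PySem.List.enumerate log_lines).foldl
    (fun acc p => acc ++ [(pvScoreA p.2, p.1, p.2)]) []
  let scored_lines := PySem.List.sorted scored_lines (fun x => x.1) true
  (PySem.List.slice scored_lines none (some count)).foldl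
    (fun acc x => acc ++ [PySem.Str.strip x.2.2]) []

-- ===== PORT B =====
-- Source B's _score: severity + 3 * keyword count + length bonus
def pvScoreB (line : String) : Int :=
  let u := PySem.Str.upper line
  let sev : Int :=
    if PySem.Str.isIn "CRITICAL" u || PySem.Str.isIn "FATAL" u then 10
    else if PySem.Str.isIn "ERROR" u then 7
    else if PySem.Str.isIn "WARN" u || PySem.Str.isIn "WARNING" u then 5
    else 0
  let kw : Int := 3 * (["exception", "timeout", "failed", "denied", "refused"].countP
    (fun k => PySem.Str.isIn k u) : Int)
  sev + kw + (if 50 < PySem.Str.len line ∧ PySem.Str.len line < 500 then 1 else 0)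

def extract_key_log_snippets_alt (log_lines : List String) (count : Int) : List String :=
  let keyed := (PySem.List.enumerate log_lines).map (fun p => (pvScoreB p.2, p))
  -- buckets.setdefault(s, []).append(item)  ==  modify s [] (· ++ [item])
  let buckets := keyed.foldl (fun d q => d.modify q.1 [] (fun v => v ++ [q.2])) PySem.Dict.empty
  let ordered := (PySem.List.sorted buckets.keys (fun s => s) true).foldl
    (fun acc s => acc ++ buckets.getD s []) []
  (PySem.List.slice ordered none (some count)).map (fun q => PySem.Str.strip q.2)

-- ===== PRECONDITION & SPEC =====
def Spec_extract_key_log_snippets (log_lines : List String) (count : Int) (out : List String) : Prop := out = extract_key_log_snippets_alt log_lines count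
instance (log_lines : List String) (count : Int) (out : List String) : Decidable (Spec_extract_key_log_snippets log_lines count out) := by unfold Spec_extract_key_log_snippets; infer_instance

-- ===== CLAIM (what is proved, stated in full; the proofs are below) =====
def Claim_equal_extract_key_log_snippets : Prop := ∀ (log_lines : List String) (count : Int), Dom_extract_key_log_snippets log_lines count → Spec_extract_key_log_snippets log_lines count (extract_key_log_snippets log_lines count)

-- ===== LEMMAS AND PROOFS =====

-- A's sequential += scoring equals B's recomposed scoring
theorem pv_score_eq (line : String) : pvScoreA line = pvScoreB line := by
  have hfold : ∀ (u : String) (sc : Int),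
      (["exception", "timeout", "failed", "denied", "refused"].foldl
        (fun sc kw => if PySem.Str.isIn kw u then sc + 3 else sc) sc)
      = sc + 3 * (["exception", "timeout", "failed", "denied", "refused"].countP
          (fun k => PySem.Str.isIn k u) : Int) := by
    intro u sc
    simp only [List.foldl_cons, List.foldl_nil, List.countP_cons, List.countP_nil]
    cases PySem.Str.isIn "exception" u <;> cases PySem.Str.isIn "timeout" u <;>
      cases PySem.Str.isIn "failed" u <;> cases PySem.Str.isIn "denied" u <;>
      cases PySem.Str.isIn "refused" u <;> simp <;> push_cast <;> ring
  unfold pvScoreA pvScoreB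
  dsimp only
  rw [hfold]
  split_ifs <;> ring

-- PySem.List.insertBy fully characterised as a takeWhile/dropWhile split
theorem pv_insertBy_eq {α : Type} (bf : α → α → Bool) (x : α) (S : List α) :
    PySem.List.insertBy bf x S =
      S.takeWhile (fun y => !bf x y) ++ x :: S.dropWhile (fun y => !bf x y) := by
  induction S with
  | nil => simp [PySem.List.insertBy]
  | cons y ys ih => by_cases h : bf x y <;> simp [PySem.List.insertBy, h, ih]

-- takeWhile/dropWhile pass over / cut a leading block on which the predicate holds
theorem pv_tw_all {α : Type} (p : α → Bool) (A B : List α) (h : ∀ a ∈ A, p a = true) :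
    (A ++ B).takeWhile p = A ++ B.takeWhile p ∧ (A ++ B).dropWhile p = B.dropWhile p := by
  induction A with
  | nil => simp
  | cons a A ih =>
    have ha := h a (by simp)
    have ih' := ih (fun t ht => h t (by simp [ht]))
    simp [ha, ih'.1, ih'.2]

-- takeWhile/dropWhile over a concatenation of nonempty buckets, with a predicate
-- constant on each bucket, act on whole buckets
theorem pv_takeWhile_flatMap {α : Type} (p : α → Bool) (P : Int → Bool)
    (S : List Int) (g : Int → List α)
    (hc : ∀ s ∈ S, ∀ y ∈ g s, p y = P s) (hne : ∀ s ∈ S, g s ≠ []) :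
    (S.flatMap g).takeWhile p = (S.takeWhile P).flatMap g ∧
    (S.flatMap g).dropWhile p = (S.dropWhile P).flatMap g := by
  induction S with
  | nil => simp
  | cons s T ih =>
    have ih' := ih (fun t ht => hc t (List.mem_cons_of_mem _ ht))
      (fun t ht => hne t (List.mem_cons_of_mem _ ht))
    rw [List.flatMap_cons]
    by_cases hP : P s = true
    · have hall : ∀ a ∈ g s, p a = true := fun a ha => by
        rw [hc s (by simp) a ha, hP]
      obtain ⟨h1, h2⟩ := pv_tw_all p (g s) (T.flatMap g) hall
      constructor
      · rw [h1, ih'.1, List.takeWhile_cons, if_pos hP, List.flatMap_cons]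
      · rw [h2, ih'.2, List.dropWhile_cons, if_pos hP]
    · have hPf : P s = false := by simpa using hP
      obtain ⟨z, zs, hz⟩ := List.exists_cons_of_ne_nil (hne s (by simp))
      have hpz : p z = false := by
        rw [hc s (by simp) z (by rw [hz]; simp), hPf]
      constructor
      · rw [hz, List.cons_append, List.takeWhile_cons, if_neg (by simp [hpz]),
            List.takeWhile_cons, if_neg (by simp [hPf]), List.flatMap_nil]
      · rw [hz, List.cons_append, List.dropWhile_cons, if_neg (by simp [hpz]),
            List.dropWhile_cons, if_neg (by simp [hPf]), List.flatMap_cons, hz,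
            List.cons_append]

-- inserting x after all elements of key ≥ x.1 into a strictly-descending bucket
-- concatenation that already has a bucket for x.1 appends x to that bucket
theorem pv_insert_mem {α : Type} (x : Int × α) (S : List Int) (g : Int → List (Int × α))
    (hS : S.Pairwise (· > ·)) (hmem : x.1 ∈ S)
    (hg : ∀ s ∈ S, ∀ y ∈ g s, y.1 = s) :
    (S.takeWhile (fun s => !decide (s < x.1))).flatMap g ++
      x :: (S.dropWhile (fun s => !decide (s < x.1))).flatMap g =
    S.flatMap (fun s => g s ++ if x.1 == s then [x] else []) := by
  induction S with
  | nil => cases hmem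
  | cons s T ih =>
    rw [List.pairwise_cons] at hS
    by_cases hsx : s = x.1
    · have hPs : (!decide (s < x.1)) = true := by simp [hsx]
      have hTlt : ∀ t ∈ T, t < x.1 := fun t ht => hsx ▸ hS.1 t ht
      have htkT : T.takeWhile (fun s => !decide (s < x.1)) = [] := by
        cases T with
        | nil => rfl
        | cons t T' =>
          rw [List.takeWhile_cons, if_neg]
          simp [hTlt t (by simp)]
      have hdwT : T.dropWhile (fun s => !decide (s < x.1)) = T := by
        cases T with
        | nil => rfl
        | cons t T' =>
          rw [List.dropWhile_cons, if_neg]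
          simp [hTlt t (by simp)]
      have hcongT : T.flatMap (fun s => g s ++ if x.1 == s then [x] else [])
          = T.flatMap g := by
        apply List.flatMap_congr
        intro t ht
        rw [if_neg, List.append_nil]
        have := hTlt t ht
        simp
        omega
      rw [List.takeWhile_cons, if_pos hPs, List.dropWhile_cons, if_pos hPs,
          htkT, hdwT, List.flatMap_cons, List.flatMap_cons, List.flatMap_nil,
          hcongT, if_pos (by simp [hsx]), List.append_nil]
      simp
    · have hxT : x.1 ∈ T := by
        rcases List.mem_cons.1 hmem with h | h
        · exact absurd h.symm hsx
        · exact h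
      have hPs : (!decide (s < x.1)) = true := by
        have : s > x.1 := hS.1 x.1 hxT
        simp
        omega
      have ihh := ih hS.2 hxT (fun t ht => hg t (List.mem_cons_of_mem _ ht))
      rw [List.takeWhile_cons, if_pos hPs, List.dropWhile_cons, if_pos hPs,
          List.flatMap_cons, List.flatMap_cons, List.append_assoc, ihh,
          if_neg (by simp; exact fun h => hsx h.symm), List.append_nil]

-- the sorted distinct keys, descending: strictly descending, same members
theorem pv_keys_sorted (ks : List Int) :
    (PySem.List.sorted (PySem.Set.ofList ks) (fun s => s) true).Pairwise (· > ·) ∧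
    (∀ s, s ∈ PySem.List.sorted (PySem.Set.ofList ks) (fun s => s) true ↔ s ∈ ks) := by
  have hperm := PySem.List.sorted_perm (PySem.Set.ofList ks) (fun s => s) true
  have hnd : (PySem.List.sorted (PySem.Set.ofList ks) (fun s => s) true).Nodup :=
    hperm.nodup_iff.mpr (PySem.Set.nodup_ofList ks)
  have hpw := PySem.List.sorted_pairwise_rev (PySem.Set.ofList ks) (fun s => s)
  constructor
  · exact (hpw.and hnd).imp (fun {a b} h => lt_of_le_of_ne h.1 (Ne.symm h.2))
  · intro s
    rw [hperm.mem_iff, PySem.Set.mem_ofList]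

-- MAIN: Python's stable descending sort by first component IS the concatenation of the
-- per-score buckets (each in original order) in descending score order
theorem pv_sorted_buckets {α : Type} (l : List (Int × α)) :
    PySem.List.sorted l (fun x => x.1) true =
      (PySem.List.sorted (PySem.Set.ofList (l.map (fun x => x.1))) (fun s => s) true).flatMap
        (fun s => l.filter (fun x => x.1 == s)) := by
  induction l using List.reverseRecOn with
  | nil => simp [PySem.List.sorted, PySem.Set.ofList]
  | append_singleton l x ih =>
    rw [PySem.List.sorted_rev_eq_foldl_insertBy, List.foldl_append, List.foldl_cons,
        List.foldl_nil, ← PySem.List.sorted_rev_eq_foldl_insertBy, ih]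
    have hkeys := pv_keys_sorted (l.map (fun x => x.1))
    set S := PySem.List.sorted (PySem.Set.ofList (List.map (fun x => x.1) l))
      (fun s => s) true with hSdef
    have hg : ∀ s ∈ S, ∀ y ∈ l.filter (fun x => x.1 == s), y.1 = s := by
      intro s _ y hy
      simpa using (List.of_mem_filter hy)
    have hne : ∀ s ∈ S, l.filter (fun x => x.1 == s) ≠ [] := by
      intro s hs hemp
      obtain ⟨y, hyl, hy1⟩ := List.mem_map.1 ((hkeys.2 s).1 hs)
      have : y ∈ l.filter (fun x => x.1 == s) := List.mem_filter.2 ⟨hyl, by simp [hy1]⟩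
      simp [hemp] at this
    rw [pv_insertBy_eq]
    have hbeta : (fun y => !(fun a b => decide ((fun x => x.1) b < (fun x => x.1) a)) x y)
        = (fun y : Int × α => !decide (y.1 < x.1)) := rfl
    rw [hbeta]
    obtain ⟨htw, hdw⟩ := pv_takeWhile_flatMap (fun y : Int × α => !decide (y.1 < x.1))
      (fun s => !decide (s < x.1)) S (fun s => l.filter (fun x => x.1 == s))
      (fun s hs y hy => by have h := hg s hs y hy; dsimp only; rw [h]) hne
    rw [htw, hdw]
    have hfil : ∀ s, (l ++ [x]).filter (fun y => y.1 == s)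
        = l.filter (fun y => y.1 == s) ++ if x.1 == s then [x] else [] := by
      intro s
      rw [List.filter_append]
      congr 1
      cases h : x.1 == s <;> simp [h]
    by_cases hcm : x.1 ∈ l.map (fun x => x.1)
    · have hS' : PySem.Set.ofList ((l ++ [x]).map (fun x => x.1))
          = PySem.Set.ofList (l.map (fun x => x.1)) := by
        rw [List.map_append, List.map_cons, List.map_nil,
            PySem.Set.ofList_append_singleton]
        exact PySem.Set.add_of_mem ((PySem.Set.mem_ofList _ _).2 hcm)
      rw [hS', ← hSdef, List.flatMap_congr (fun s _ => hfil s)]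
      exact pv_insert_mem x S _ hkeys.1 ((hkeys.2 x.1).2 hcm) hg
    · have hS' : PySem.Set.ofList ((l ++ [x]).map (fun x => x.1))
          = PySem.Set.ofList (l.map (fun x => x.1)) ++ [x.1] := by
        rw [List.map_append, List.map_cons, List.map_nil,
            PySem.Set.ofList_append_singleton]
        exact PySem.Set.add_of_not_mem (fun h => hcm ((PySem.Set.mem_ofList _ _).1 h))
      rw [hS', PySem.List.sorted_rev_eq_foldl_insertBy, List.foldl_append, List.foldl_cons,
          List.foldl_nil, ← PySem.List.sorted_rev_eq_foldl_insertBy, ← hSdef, pv_insertBy_eq]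
      have hbeta2 : (fun y => !(fun a b : Int => decide ((fun s => s) b < (fun s => s) a)) x.1 y)
          = (fun y : Int => !decide (y < x.1)) := rfl
      rw [hbeta2, List.flatMap_append, List.flatMap_cons]
      have hcong : ∀ s ∈ S, (l ++ [x]).filter (fun y => y.1 == s)
          = l.filter (fun y => y.1 == s) := by
        intro s hs
        rw [hfil s, if_neg, List.append_nil]
        simp
        exact fun h => hcm (h ▸ (hkeys.2 s).1 hs)
      have hgx : (l ++ [x]).filter (fun y => y.1 == x.1) = [x] := by
        rw [hfil x.1, if_pos (by simp)]
        have : l.filter (fun y => y.1 == x.1) = [] := by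
          rw [List.filter_eq_nil_iff]
          intro y hy h
          exact hcm (List.mem_map.2 ⟨y, hy, by simpa using h⟩)
        rw [this, List.nil_append]
      rw [hgx,
          List.flatMap_congr (fun s hs => hcong s ((List.takeWhile_sublist _).mem hs)),
          List.flatMap_congr (fun s hs => hcong s ((List.dropWhile_sublist _).mem hs))]
      simp

-- slice [:b] commutes with map (clamping depends only on the length)
theorem pv_slice_map {α β : Type} (h : α → β) (xs : List α) (b : Int) :
    (PySem.List.slice xs none (some b)).map h = PySem.List.slice (xs.map h) none (some b) := by
  simp [PySem.List.slice, List.map_take]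

-- ===== VERDICT (by name: the statement is the Claim_ definition above) =====
theorem extract_key_log_snippets_spec : Claim_equal_extract_key_log_snippets := by
  intro log_lines count _
  unfold Spec_extract_key_log_snippets extract_key_log_snippets extract_key_log_snippets_alt
  dsimp only
  simp only [PySem.List.foldl_append_singleton_eq_map, List.nil_append]
  have hmap : (PySem.List.enumerate log_lines).map
      (fun p => ((pvScoreA p.2, p.1, p.2) : Int × Int × String))
      = (PySem.List.enumerate log_lines).map (fun p => (pvScoreB p.2, p)) := by
    apply List.map_congr_left
    intro p _
    rw [pv_score_eq]
  rw [hmap]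
  set keyed := (PySem.List.enumerate log_lines).map (fun p => (pvScoreB p.2, p)) with hk
  have hbuck : ∀ s, (keyed.foldl (fun d q => d.modify q.1 [] (fun v => v ++ [q.2]))
      PySem.Dict.empty).getD s []
      = (keyed.filter (fun y => y.1 == s)).map (fun y => y.2) := by
    intro s
    rw [PySem.Dict.getD_foldl_modify_append, PySem.Dict.getD_empty, List.nil_append]
  have hkeysb : (keyed.foldl (fun d q => d.modify q.1 [] (fun v => v ++ [q.2]))
      PySem.Dict.empty).keys = PySem.Set.ofList (keyed.map (fun y => y.1)) := by
    rw [PySem.Dict.keys_foldl_modify_key keyed (fun q => q.1) []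
      (fun _ q => fun v => v ++ [q.2]) PySem.Dict.empty]
    rw [PySem.Dict.keys_empty, PySem.Set.update_nil_left]
  simp only [PySem.List.foldl_append_eq_flatMap, List.nil_append]
  rw [hkeysb]
  have hord : (PySem.List.sorted (PySem.Set.ofList (keyed.map (fun y => y.1)))
        (fun s => s) true).flatMap
        (fun s => (keyed.foldl (fun d q => d.modify q.1 [] (fun v => v ++ [q.2]))
          PySem.Dict.empty).getD s [])
      = (PySem.List.sorted keyed (fun x => x.1) true).map (fun y => y.2) := by
    rw [List.flatMap_congr (fun s _ => hbuck s), ← List.map_flatMap, ← pv_sorted_buckets]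
  rw [hord, ← pv_slice_map, List.map_map]
  rfl
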